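-- pv_equiv track=rewrite | github.com/Yidnekworku1/Eskigemtbot | EskiGemet_telegram_bot.py | guess_compare
-- ===== SOURCE A (Python) =====
-- def guess_compare(guessNum , secNum):
--     count = 0
--     position = 0
--     index = 0
--     for i in range(len(guessNum)):
--         if guessNum[index] == secNum[index]:
--             position +=1
--         index += 1
--         for j in range(len(secNum)):
--             if guessNum[i] == secNum[j]:
--                 count +=1
--     return count,position
-- ===== SOURCE B (Python) =====
-- # Frequency-table version: one counting pass over each list, then a product of
-- # per-value counts -- O(n+m) instead of A's nested O(n*m) scan.  The position
-- # check keeps explicit indexing, so it raises IndexError on a short secNum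
-- # exactly as A does.
-- def guess_compare(guessNum, secNum):
--     gfreq = {}
--     for x in guessNum:
--         gfreq[x] = gfreq.get(x, 0) + 1
--     sfreq = {}
--     for x in secNum:
--         sfreq[x] = sfreq.get(x, 0) + 1
--     count = 0
--     for c, n in gfreq.items():
--         count += n * sfreq.get(c, 0)
--     position = 0
--     for i in range(len(guessNum)):
--         if guessNum[i] == secNum[i]:
--             position += 1
--     return count, position
-- ===== Notes on version B (the rewrite author's own statement) =====
-- stated objective: faster
-- what changed: Replaces A's nested scan (for each guess element, scan all of secNum) by two frequency tables built in one pass each, with count = sum of per-value count products; the positional check stays an indexed loop.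
import Mathlib
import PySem

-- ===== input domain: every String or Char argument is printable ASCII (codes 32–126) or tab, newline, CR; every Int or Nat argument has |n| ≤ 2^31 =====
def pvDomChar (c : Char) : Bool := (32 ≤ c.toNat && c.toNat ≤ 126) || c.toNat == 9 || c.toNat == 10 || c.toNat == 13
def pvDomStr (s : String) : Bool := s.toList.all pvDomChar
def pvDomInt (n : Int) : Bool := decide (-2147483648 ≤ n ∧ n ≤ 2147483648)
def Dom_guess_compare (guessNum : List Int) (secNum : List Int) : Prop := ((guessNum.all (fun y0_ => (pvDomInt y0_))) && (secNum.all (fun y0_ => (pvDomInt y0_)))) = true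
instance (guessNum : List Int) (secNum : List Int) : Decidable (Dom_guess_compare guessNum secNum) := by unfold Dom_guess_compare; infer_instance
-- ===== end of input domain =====

-- B replaces A's nested O(n*m) scan by two one-pass frequency tables whose
-- per-value count products are summed; the positional check stays an indexed loop.

-- ===== PORT A =====
def guess_compare (guessNum : List Int) (secNum : List Int) : List Int :=
  let st := (PySem.List.pyRange 0 (PySem.List.len guessNum) 1).foldl
    (fun (st : Int × Int × Int) i =>
      let count := st.1
      let position := st.2.1
      let index := st.2.2
      let position := if PySem.List.pyGetD guessNum index 0 == PySem.List.pyGetD secNum index 0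
                      then position + 1 else position
      let index := index + 1
      let count := (PySem.List.pyRange 0 (PySem.List.len secNum) 1).foldl
        (fun c j => if PySem.List.pyGetD guessNum i 0 == PySem.List.pyGetD secNum j 0
                    then c + 1 else c) count
      (count, position, index))
    ((0 : Int), (0 : Int), (0 : Int))
  [st.1, st.2.1]

-- ===== PORT B =====
def guess_compare_alt (guessNum : List Int) (secNum : List Int) : List Int :=
  let gfreq := guessNum.foldl (fun d x => d.insert x (d.getD x 0 + 1)) (PySem.Dict.empty : PySem.Dict Int Int)
  let sfreq := secNum.foldl (fun d x => d.insert x (d.getD x 0 + 1)) (PySem.Dict.empty : PySem.Dict Int Int)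
  let count := gfreq.items.foldl (fun acc p => acc + p.2 * sfreq.getD p.1 0) 0
  let position := (PySem.List.pyRange 0 (PySem.List.len guessNum) 1).foldl
    (fun acc i => if PySem.List.pyGetD guessNum i 0 == PySem.List.pyGetD secNum i 0
                  then acc + 1 else acc) (0 : Int)
  [count, position]

-- ===== PRECONDITION & SPEC =====
-- Pre_ excludes exactly the inputs where A raises IndexError: secNum shorter than guessNum.
def Pre_guess_compare (guessNum : List Int) (secNum : List Int) : Prop :=
  guessNum.length ≤ secNum.length
instance (guessNum : List Int) (secNum : List Int) : Decidable (Pre_guess_compare guessNum secNum) := by unfold Pre_guess_compare; infer_instance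
def pvWitness_guess_compare : List Int × List Int := ([1, 2, 2], [2, 1, 3, 2])

def Spec_guess_compare (guessNum : List Int) (secNum : List Int) (out : List Int) : Prop := out = guess_compare_alt guessNum secNum
instance (guessNum : List Int) (secNum : List Int) (out : List Int) : Decidable (Spec_guess_compare guessNum secNum out) := by unfold Spec_guess_compare; infer_instance

-- ===== CLAIM (what is proved, stated in full; the proofs are below) =====
def Claim_equal_guess_compare : Prop := ∀ (guessNum : List Int) (secNum : List Int), Dom_guess_compare guessNum secNum → Pre_guess_compare guessNum secNum → Spec_guess_compare guessNum secNum (guess_compare guessNum secNum)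

-- ===== LEMMAS AND PROOFS =====

theorem countP_beq_left (s : List Int) (v : Int) :
    List.countP (fun y => v == y) s = List.count v s := by
  rw [List.count_eq_countP]
  exact List.countP_congr (fun x _ => by rw [Bool.beq_comm])

-- B's position loop, computed: it equals the positional-match count over the zip.
theorem pos_loop (g s : List Int) (h : g.length ≤ s.length) (m : Nat) (hm : m ≤ g.length) :
    (PySem.List.pyRange 0 (m : Int)).foldl
      (fun acc i => if PySem.List.pyGetD g i 0 == PySem.List.pyGetD s i 0
                    then acc + 1 else acc) (0 : Int) =
      (((g.zip s).take m).countP (fun q => q.1 == q.2) : Int) := by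
  induction m with
  | zero =>
    rw [show ((0:Nat):Int) = 0 from rfl, show PySem.List.pyRange 0 (0:Int) = [] from by decide]
    simp
  | succ m ih =>
    have hm' : m ≤ g.length := Nat.le_of_succ_le hm
    have hmg : m < g.length := hm
    have hms : m < s.length := lt_of_lt_of_le hmg h
    have hcast : ((m + 1 : Nat) : Int) = (m : Int) + 1 := by push_cast; ring
    rw [hcast, PySem.List.pyRange_one_succ_right (by positivity), List.foldl_append, ih hm']
    simp only [List.foldl_cons, List.foldl_nil]
    have hg : PySem.List.pyGetD g (m : Int) 0 = g[m] := by
      rw [PySem.List.pyGetD_natCast, List.getD_eq_getElem _ _ hmg]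
    have hs : PySem.List.pyGetD s (m : Int) 0 = s[m] := by
      rw [PySem.List.pyGetD_natCast, List.getD_eq_getElem _ _ hms]
    have hzip : (g.zip s)[m]? = some (g[m], s[m]) := by
      rw [List.getElem?_eq_getElem (by simp [List.length_zip]; omega)]
      simp
    rw [hg, hs]
    simp only [List.take_add_one, List.countP_append, hzip, Option.toList_some,
      List.countP_cons, List.countP_nil]
    by_cases hq : g[m] = s[m] <;> simp [hq]

-- B's port, rewritten through the counter lemmas into sums over the input lists.
theorem alt_eq (g s : List Int) (h : g.length ≤ s.length) :
    guess_compare_alt g s =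
      [((PySem.List.dedup g).map (fun c => (List.count c g : Int) * (List.count c s : Int))).sum,
       ((g.zip s).countP (fun q => q.1 == q.2) : Int)] := by
  unfold guess_compare_alt
  have hlen : PySem.List.len g = ((g.length : Nat) : Int) := PySem.List.len_eq g
  rw [show PySem.List.pyRange 0 (PySem.List.len g) 1 = PySem.List.pyRange 0 (PySem.List.len g) from rfl,
    hlen, pos_loop g s h g.length le_rfl]
  have hz : (g.zip s).take g.length = g.zip s := by
    apply List.take_of_length_le; simp [List.length_zip]
  rw [hz]
  simp only [PySem.Dict.foldl_insert_getD_add_one_eq_counter, PySem.Dict.items_counter,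
    PySem.List.foldl_add, PySem.Dict.getD_counter,
    ← PySem.List.dedup_eq_ofList, List.map_map, Function.comp_def, zero_add]

-- Invariant of A's outer loop: after m iterations the state is
-- (sum of per-element match counts over the first m guesses, positional matches among the
--  first m pairs, m).
theorem A_loop (g s : List Int) (h : g.length ≤ s.length) (m : Nat) (hm : m ≤ g.length) :
    (PySem.List.pyRange 0 (m : Int)).foldl
      (fun (st : Int × Int × Int) i =>
        let count := st.1
        let position := st.2.1
        let index := st.2.2
        let position := if PySem.List.pyGetD g index 0 == PySem.List.pyGetD s index 0
                        then position + 1 else position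
        let index := index + 1
        let count := (PySem.List.pyRange 0 (PySem.List.len s) 1).foldl
          (fun c j => if PySem.List.pyGetD g i 0 == PySem.List.pyGetD s j 0
                      then c + 1 else c) count
        (count, position, index))
      ((0 : Int), (0 : Int), (0 : Int)) =
      (((g.take m).map (fun x => (List.count x s : Int))).sum,
       (((g.zip s).take m).countP (fun q => q.1 == q.2) : Int),
       (m : Int)) := by
  induction m with
  | zero =>
    rw [show ((0:Nat):Int) = 0 from rfl, show PySem.List.pyRange 0 (0:Int) = [] from by decide]
    simp
  | succ m ih =>
    have hm' : m ≤ g.length := Nat.le_of_succ_le hm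
    have hmg : m < g.length := hm
    have hms : m < s.length := lt_of_lt_of_le hmg h
    have hcast : ((m + 1 : Nat) : Int) = (m : Int) + 1 := by push_cast; ring
    rw [hcast, PySem.List.pyRange_one_succ_right (by positivity), List.foldl_append, ih hm']
    simp only [List.foldl_cons, List.foldl_nil]
    have hg : PySem.List.pyGetD g (m : Int) 0 = g[m] := by
      rw [PySem.List.pyGetD_natCast, List.getD_eq_getElem _ _ hmg]
    have hs : PySem.List.pyGetD s (m : Int) 0 = s[m] := by
      rw [PySem.List.pyGetD_natCast, List.getD_eq_getElem _ _ hms]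
    have hzip : (g.zip s)[m]? = some (g[m], s[m]) := by
      rw [List.getElem?_eq_getElem (by simp [List.length_zip]; omega)]
      simp
    have hinner : ∀ C : Int,
        (PySem.List.pyRange 0 (PySem.List.len s) 1).foldl
          (fun c j => if PySem.List.pyGetD g (m : Int) 0 == PySem.List.pyGetD s j 0
                      then c + 1 else c) C = C + (List.count g[m] s : Int) := by
      intro C
      rw [show PySem.List.pyRange 0 (PySem.List.len s) 1 = PySem.List.pyRange 0 (PySem.List.len s) from rfl,
        PySem.List.foldl_pyRange_zero_pyGetD s 0 (fun c y => if PySem.List.pyGetD g (m:Int) 0 == y then c + 1 else c) C,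
        hg, PySem.List.foldl_if_add_one, countP_beq_left]
    rw [hinner, hg, hs]
    simp only [List.take_add_one, List.map_append, List.sum_append, List.countP_append,
      hzip, List.getElem?_eq_getElem hmg, Option.toList_some, List.map_cons, List.map_nil,
      List.sum_cons, List.sum_nil, List.countP_cons, List.countP_nil]
    by_cases hq : g[m] = s[m] <;> simp [hq]

-- The grouping identity: summing s-match counts over all of g equals summing
-- (multiplicity in g) * (multiplicity in s) over the distinct values of g.
theorem group_sum (g s : List Int) :
    (g.map (fun x => (List.count x s : Int))).sum =
      ((PySem.List.dedup g).map (fun c => (List.count c g : Int) * (List.count c s : Int))).sum := by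
  rw [Finset.sum_list_map_count g (fun x => (List.count x s : Int)),
    ← List.sum_toFinset _ (PySem.List.nodup_dedup g)]
  have hfs : (PySem.List.dedup g).toFinset = g.toFinset := by
    ext x; simp
  rw [hfs]
  exact Finset.sum_congr rfl (fun m _ => by rw [nsmul_eq_mul])

-- ===== VERDICT =====
theorem guess_compare_spec : Claim_equal_guess_compare := by
  intro g s _ hpre
  unfold Spec_guess_compare guess_compare
  rw [alt_eq g s hpre]
  have hlen : PySem.List.len g = ((g.length : Nat) : Int) := PySem.List.len_eq g
  rw [show PySem.List.pyRange 0 (PySem.List.len g) 1 = PySem.List.pyRange 0 (PySem.List.len g) from rfl,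
    hlen, A_loop g s hpre g.length le_rfl]
  have hz : (g.zip s).take g.length = g.zip s := by
    apply List.take_of_length_le; simp [List.length_zip]
  rw [List.take_length, hz]
  simp only [group_sum]
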